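-- pv_equiv track=rewrite | github.com/dholab/nvd | lib/py_nvd/cli/commands/run.py | _format_command_for_display
-- ===== SOURCE A (Python) =====
-- def _format_command_for_display(cmd: list[str]) -> str:
--     """
--     Format a command list for readable display with line continuations.
--
--     Each argument pair (--flag value) gets its own line, indented and
--     with shell continuation characters for copy-paste compatibility.
--     """
--     if len(cmd) < 3:
--         return " ".join(cmd)
--
--     lines = []
--     # First line: nextflow run <pipeline_root>
--     lines.append(f"{cmd[0]} {cmd[1]} {cmd[2]} \\")
--
--     # Process remaining args in pairs where possible
--     i = 3
--     while i < len(cmd):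
--         arg = cmd[i]
--
--         # Check if this is a flag that takes a value (not a standalone flag like -resume)
--         if i + 1 < len(cmd) and not cmd[i + 1].startswith("-"):
--             # Flag with value: --param value
--             value = cmd[i + 1]
--             if i + 2 < len(cmd):
--                 lines.append(f"    {arg} {value} \\")
--             else:
--                 lines.append(f"    {arg} {value}")
--             i += 2
--         else:
--             # Standalone flag like -resume
--             if i + 1 < len(cmd):
--                 lines.append(f"    {arg} \\")
--             else:
--                 lines.append(f"    {arg}")
--             i += 1
--
--     return "\n".join(lines)
-- ===== SOURCE B (Python) =====
-- def _format_command_for_display(cmd: list[str]) -> str: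
--     if len(cmd) < 3:
--         return " ".join(cmd)
--     # First pass: fold the tail into groups, keeping at most one pending unpaired token
--     groups = []
--     pending = None
--     for tok in cmd[3:]:
--         if pending is None:
--             pending = tok
--         elif tok.startswith("-"):
--             groups.append(pending)
--             pending = tok
--         else:
--             groups.append(pending + " " + tok)
--             pending = None
--     if pending is not None:
--         groups.append(pending)
--     # Second pass: header line, then every group but the last gets a continuation backslash
--     lines = [" ".join(cmd[:3]) + " \\"]
--     lines += ["    " + g + " \\" for g in groups[:-1]]
--     if groups:
--         lines.append("    " + groups[-1])
--     return "\n".join(lines)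
-- ===== Notes on version B (the rewrite author's own statement) =====
-- stated objective: alternative
-- what changed: Two-pass decomposition: a single fold over cmd[3:] with a pending-token buffer builds the list of argument groups (replacing A's index-driven while loop with lookahead), then a separate render pass emits the header plus each group, putting a continuation backslash on every line except the last group.
import Mathlib
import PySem

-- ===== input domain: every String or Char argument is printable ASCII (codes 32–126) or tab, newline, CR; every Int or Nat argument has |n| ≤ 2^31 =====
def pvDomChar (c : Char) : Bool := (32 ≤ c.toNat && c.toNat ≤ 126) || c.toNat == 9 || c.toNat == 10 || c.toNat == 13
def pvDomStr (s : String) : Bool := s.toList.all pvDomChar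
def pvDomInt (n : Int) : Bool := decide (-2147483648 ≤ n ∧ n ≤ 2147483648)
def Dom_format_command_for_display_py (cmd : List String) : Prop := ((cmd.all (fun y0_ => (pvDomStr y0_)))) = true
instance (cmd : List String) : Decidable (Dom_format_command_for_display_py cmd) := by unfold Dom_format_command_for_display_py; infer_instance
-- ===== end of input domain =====

-- B is an alternative decomposition (group the tail tokens first, then render all lines but the
-- last with a continuation backslash); same output on every input, proved below.

-- ===== PORT A =====
-- A's while loop over index i (every index the loop reads is in range, guarded by the conditions)
def fcdALoop (cmd : List String) (i : Nat) : List String :=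
  if i < cmd.length then
    let arg := cmd.getD i ""
    if i + 1 < cmd.length ∧ ¬ (PySem.Str.startswith (cmd.getD (i+1) "") "-") then
      let value := cmd.getD (i+1) ""
      (if i + 2 < cmd.length then "    " ++ arg ++ " " ++ value ++ " \\"
       else "    " ++ arg ++ " " ++ value) :: fcdALoop cmd (i+2)
    else
      (if i + 1 < cmd.length then "    " ++ arg ++ " \\"
       else "    " ++ arg) :: fcdALoop cmd (i+1)
  else []
termination_by cmd.length - i
decreasing_by all_goals omega

def format_command_for_display_py (cmd : List String) : String :=
  if cmd.length < 3 then PySem.Str.join " " cmd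
  else
    PySem.Str.join "\n"
      ((cmd.getD 0 "" ++ " " ++ cmd.getD 1 "" ++ " " ++ cmd.getD 2 "" ++ " \\") :: fcdALoop cmd 3)

-- ===== PORT B =====
-- B's first pass: one fold over cmd[3:] with state (groups, pending unpaired token)
def fcdBStep : (List String × Option String) → String → (List String × Option String)
  | (gs, none), tok => (gs, some tok)
  | (gs, some p), tok =>
    if PySem.Str.startswith tok "-" then (gs ++ [p], some tok)
    else (gs ++ [p ++ " " ++ tok], none)

def fcdBGroups (rest : List String) : List String :=
  let st := rest.foldl fcdBStep ([], none)
  st.1 ++ (match st.2 with | none => [] | some p => [p])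

def format_command_for_display_py_alt (cmd : List String) : String :=
  if cmd.length < 3 then PySem.Str.join " " cmd
  else
    let groups := fcdBGroups (cmd.drop 3)                      -- cmd[3:]
    let lines := (PySem.Str.join " " (cmd.take 3) ++ " \\")    -- " ".join(cmd[:3]) + " \\"
      :: (groups.dropLast.map (fun g => "    " ++ g ++ " \\")  -- groups[:-1]
          ++ (match groups.getLast? with                       -- groups[-1] if groups nonempty
              | none => []
              | some g => ["    " ++ g]))
    PySem.Str.join "\n" lines

-- ===== PRECONDITION & SPEC =====
def Spec_format_command_for_display_py (cmd : List String) (out : String) : Prop := out = format_command_for_display_py_alt cmd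
instance (cmd : List String) (out : String) : Decidable (Spec_format_command_for_display_py cmd out) := by unfold Spec_format_command_for_display_py; infer_instance

-- ===== CLAIM (what is proved, stated in full; the proofs are below) =====
def Claim_equal_format_command_for_display_py : Prop := ∀ (cmd : List String), Dom_format_command_for_display_py cmd → Spec_format_command_for_display_py cmd (format_command_for_display_py cmd)

-- ===== LEMMAS AND PROOFS =====

-- recursive characterisation of the grouping (proof-side helper)
def fcdGroupsRec : List String → List String
  | [] => []
  | [a] => [a]
  | a :: b :: t =>
    if ¬ (PySem.Str.startswith b "-") then (a ++ " " ++ b) :: fcdGroupsRec t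
    else a :: fcdGroupsRec (b :: t)

def fcdFinish (st : List String × Option String) : List String :=
  st.1 ++ (match st.2 with | none => [] | some p => [p])

lemma fcdFold_eq (l : List String) : ∀ (gs : List String) (p? : Option String),
    fcdFinish (l.foldl fcdBStep (gs, p?)) =
      gs ++ fcdGroupsRec ((match p? with | none => [] | some p => [p]) ++ l) := by
  induction l with
  | nil =>
    intro gs p?
    cases p? <;> simp [fcdFinish, fcdGroupsRec]
  | cons tok t ih =>
    intro gs p?
    cases p? with
    | none => simpa [fcdBStep] using ih gs (some tok)
    | some p =>
      by_cases hs : PySem.Str.startswith tok "-"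
      · rw [List.foldl_cons]
        simp only [fcdBStep, if_pos hs]
        rw [ih (gs ++ [p]) (some tok)]
        have hg : fcdGroupsRec (p :: tok :: t) = p :: fcdGroupsRec (tok :: t) := by
          have hs' : PySem.Chars.startswith tok.toList ['-'] = true := by simpa using hs
          rw [fcdGroupsRec, if_neg (by simp [hs'])]
        simp [hg]
      · rw [List.foldl_cons]
        simp only [fcdBStep, if_neg hs]
        rw [ih (gs ++ [p ++ " " ++ tok]) none]
        have hg : fcdGroupsRec (p :: tok :: t) = (p ++ " " ++ tok) :: fcdGroupsRec t := by
          rw [fcdGroupsRec, if_pos hs]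
        simp [hg]

lemma fcdBGroups_eq_rec (l : List String) : fcdBGroups l = fcdGroupsRec l := by
  simpa [fcdBGroups, fcdFinish] using fcdFold_eq l [] none

-- renderTail groups = B's rendering of the non-header lines
def renderTail (groups : List String) : List String :=
  groups.dropLast.map (fun g => "    " ++ g ++ " \\")
    ++ (match groups.getLast? with | none => [] | some g => ["    " ++ g])

lemma renderTail_cons (g : String) (gs : List String) :
    renderTail (g :: gs) =
      (if gs = [] then ["    " ++ g] else ("    " ++ g ++ " \\") :: renderTail gs) := by
  cases gs with
  | nil => simp [renderTail]
  | cons h t => simp [renderTail]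

lemma fcdGroupsRec_eq_nil_iff (l : List String) : fcdGroupsRec l = [] ↔ l = [] := by
  match l with
  | [] => simp [fcdGroupsRec]
  | [a] => simp [fcdGroupsRec]
  | a :: b :: t =>
    constructor
    · intro h
      rw [fcdGroupsRec] at h
      split at h <;> simp_all
    · intro h; simp_all

-- A's loop from index i produces exactly B's rendering of the groups of the suffix cmd[i:]
lemma fcdALoop_eq (cmd : List String) (i : Nat) :
    fcdALoop cmd i = renderTail (fcdGroupsRec (cmd.drop i)) := by
  by_cases h : i < cmd.length
  · have hdrop : cmd.drop i = cmd[i] :: cmd.drop (i+1) := List.drop_eq_getElem_cons h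
    have hgetD : cmd.getD i "" = cmd[i] := List.getD_eq_getElem cmd "" h
    by_cases h1 : i + 1 < cmd.length
    · have hdrop1 : cmd.drop (i+1) = cmd[i+1] :: cmd.drop (i+2) := List.drop_eq_getElem_cons h1
      have hgetD1 : cmd.getD (i+1) "" = cmd[i+1] := List.getD_eq_getElem cmd "" h1
      by_cases hs : PySem.Str.startswith cmd[i+1] "-"
      · -- standalone flag
        rw [fcdALoop, hdrop, hdrop1, fcdGroupsRec]
        rw [fcdALoop_eq cmd (i+1), hdrop1]
        simp only [hgetD, hgetD1, hs, not_true_eq_false, and_false, if_false]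
        rw [if_pos h]
        rw [if_pos h1]
        rw [renderTail_cons]
        have hne : fcdGroupsRec (List.drop (i+1) cmd) ≠ [] := by
          rw [ne_eq, fcdGroupsRec_eq_nil_iff, List.drop_eq_nil_iff]; omega
        rw [← hdrop1, if_neg hne]
      · -- flag with value
        rw [fcdALoop, hdrop, hdrop1, fcdGroupsRec]
        rw [fcdALoop_eq cmd (i+2)]
        simp only [hgetD, hgetD1, hs, h, h1, and_true, Bool.not_eq_true, ite_true]
        rw [renderTail_cons]
        by_cases h2 : i + 2 < cmd.length
        · rw [if_pos h2, if_neg (by rw [fcdGroupsRec_eq_nil_iff, List.drop_eq_nil_iff]; omega)]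
          simp [String.append_assoc]
        · have hd2 : cmd.drop (i+2) = [] := by rw [List.drop_eq_nil_iff]; omega
          rw [if_neg h2, if_pos (by rw [fcdGroupsRec_eq_nil_iff]; exact hd2)]
          simp [hd2, fcdGroupsRec, renderTail, String.append_assoc]
    · -- last element, standalone
      have hdrop1 : cmd.drop (i+1) = [] := by rw [List.drop_eq_nil_iff]; omega
      rw [fcdALoop, hdrop, hdrop1, fcdALoop_eq cmd (i+1), hdrop1]
      simp only [h, h1, hgetD, ite_false, ite_true]
      simp [fcdGroupsRec, renderTail, h1]
  · have hdrop : cmd.drop i = [] := by rw [List.drop_eq_nil_iff]; omega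
    rw [fcdALoop, if_neg h, hdrop]
    simp [fcdGroupsRec, renderTail]
termination_by cmd.length - i
decreasing_by all_goals omega

lemma join_three (a b c : String) :
    PySem.Str.join " " [a, b, c] = a ++ " " ++ b ++ " " ++ c := by
  simp [PySem.Str.join, PySem.Chars.join_cons_cons, PySem.Chars.join_singleton]
  apply String.toList_injective
  simp [String.toList_append]

-- ===== VERDICT (by name: the statement is the Claim_ definition above) =====
theorem format_command_for_display_py_spec : Claim_equal_format_command_for_display_py := by
  intro cmd _
  unfold Spec_format_command_for_display_py format_command_for_display_py format_command_for_display_py_alt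
  by_cases h : cmd.length < 3
  · rw [if_pos h, if_pos h]
  · rw [if_neg h, if_neg h]
    match cmd, h with
    | [], hh => simp at hh
    | [a], hh => simp at hh
    | [a, b], hh => simp at hh
    | a :: b :: c :: rest, _ =>
      have hA : fcdALoop (a :: b :: c :: rest) 3 =
          renderTail (fcdGroupsRec ((a :: b :: c :: rest).drop 3)) := fcdALoop_eq _ 3
      simp only [List.drop] at hA
      simp only [List.getD, List.take, List.drop, List.getElem?_cons_zero,
        List.getElem?_cons_succ, Option.getD_some, hA, join_three, renderTail,
        fcdBGroups_eq_rec]
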